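-- pv_equiv track=rewrite | github.com/MaSommer/ProjectThesis-NeuralNet | GoogleSheetWriter.py | write_hyp_dicts_to_file_type_1
-- ===== SOURCE A (Python) =====
-- def write_hyp_dicts_to_file_type_1(hyp_dicts_type_1, ordered_label_list_type_1):
--     label_list = []
--     value_list = []
--     for label in ordered_label_list_type_1:
--         for hyp_dict in hyp_dicts_type_1:
--             if (label in hyp_dict):
--                 value = hyp_dict[label]
--                 label_list.append(str(label))
--                 value_list.append(str(value))
--     return label_list, value_list
-- ===== SOURCE B (Python) =====
-- def write_hyp_dicts_to_file_type_1(hyp_dicts_type_1, ordered_label_list_type_1):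
--     # One pass over the dicts builds label -> [str(value), ...] (in dict order),
--     # then one pass over the ordered labels emits the rows: O(L + total entries).
--     index = {}
--     for hyp_dict in hyp_dicts_type_1:
--         for label, value in hyp_dict.items():
--             index.setdefault(label, []).append(str(value))
--     label_list = []
--     value_list = []
--     for label in ordered_label_list_type_1:
--         for value_str in index.get(label, []):
--             label_list.append(label)
--             value_list.append(value_str)
--     return label_list, value_list
-- ===== Notes on version B (the rewrite author's own statement) =====
-- stated objective: faster
-- what changed: Replaces the per-label scan over all dicts by a hash index label->list of stringified values built in one pass over the dicts, then a single pass over the ordered labels.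
import Mathlib
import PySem

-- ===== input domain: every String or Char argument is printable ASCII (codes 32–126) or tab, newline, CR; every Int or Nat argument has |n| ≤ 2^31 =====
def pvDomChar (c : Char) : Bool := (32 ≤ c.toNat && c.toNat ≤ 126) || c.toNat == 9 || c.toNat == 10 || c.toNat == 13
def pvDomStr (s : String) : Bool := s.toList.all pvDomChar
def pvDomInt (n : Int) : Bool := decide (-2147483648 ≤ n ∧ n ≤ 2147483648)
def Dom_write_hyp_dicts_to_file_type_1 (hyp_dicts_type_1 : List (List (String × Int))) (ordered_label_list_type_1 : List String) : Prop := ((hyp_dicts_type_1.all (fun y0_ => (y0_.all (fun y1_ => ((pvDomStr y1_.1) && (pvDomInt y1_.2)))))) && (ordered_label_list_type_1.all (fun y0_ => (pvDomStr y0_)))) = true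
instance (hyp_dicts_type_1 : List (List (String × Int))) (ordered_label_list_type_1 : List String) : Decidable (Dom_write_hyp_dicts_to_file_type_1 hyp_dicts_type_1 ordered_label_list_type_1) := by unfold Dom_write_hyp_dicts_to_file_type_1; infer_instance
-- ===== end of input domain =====

-- B builds a label -> stringified-values index in one pass over the dicts, then emits per
-- ordered label: O(L + entries) instead of A's O(L*D) rescan of every dict per label.

-- ===== PORT A =====
-- 'label in hyp_dict' / 'hyp_dict[label]' on the association-list representation: first match.
def write_hyp_dicts_to_file_type_1 (hyp_dicts_type_1 : List (List (String × Int))) (ordered_label_list_type_1 : List String) : List String × List String :=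
  ordered_label_list_type_1.foldl (fun acc label =>
    hyp_dicts_type_1.foldl (fun acc hyp_dict =>
      match List.lookup label hyp_dict with
      | some value => (acc.1 ++ [label], acc.2 ++ [PySem.Int.toStr value])
      | none => acc) acc) ([], [])

-- ===== PORT B =====
-- index = {}; for hyp_dict: for label, value in hyp_dict.items(): index.setdefault(label, []).append(str(value))
def pvIndex_write_hyp (hyp_dicts_type_1 : List (List (String × Int))) : PySem.Dict String (List String) :=
  hyp_dicts_type_1.foldl (fun idx hyp_dict =>
    hyp_dict.foldl (fun idx p => idx.modify p.1 [] (fun l => l ++ [PySem.Int.toStr p.2])) idx)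
    PySem.Dict.empty

def write_hyp_dicts_to_file_type_1_alt (hyp_dicts_type_1 : List (List (String × Int))) (ordered_label_list_type_1 : List String) : List String × List String :=
  let index := pvIndex_write_hyp hyp_dicts_type_1
  ordered_label_list_type_1.foldl (fun acc label =>
    (index.getD label []).foldl (fun acc value_str =>
      (acc.1 ++ [label], acc.2 ++ [value_str])) acc) ([], [])

-- ===== PRECONDITION & SPEC =====
-- Each inner association list stands for a Python dict, which cannot hold duplicate keys;
-- Pre_ only excludes duplicate-key lists, which no Python input can produce.
def Pre_write_hyp_dicts_to_file_type_1 (hyp_dicts_type_1 : List (List (String × Int))) (ordered_label_list_type_1 : List String) : Prop :=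
  ∀ d ∈ hyp_dicts_type_1, (d.map Prod.fst).Nodup
instance (hyp_dicts_type_1 : List (List (String × Int))) (ordered_label_list_type_1 : List String) : Decidable (Pre_write_hyp_dicts_to_file_type_1 hyp_dicts_type_1 ordered_label_list_type_1) := by unfold Pre_write_hyp_dicts_to_file_type_1; infer_instance

def pvWitness_write_hyp_dicts_to_file_type_1 : (List (List (String × Int))) × List String :=
  ([[("a", 1)], [("a", 2), ("b", 3)]], ["b", "a", "a"])

def Spec_write_hyp_dicts_to_file_type_1 (hyp_dicts_type_1 : List (List (String × Int))) (ordered_label_list_type_1 : List String) (out : List String × List String) : Prop := out = write_hyp_dicts_to_file_type_1_alt hyp_dicts_type_1 ordered_label_list_type_1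
instance (hyp_dicts_type_1 : List (List (String × Int))) (ordered_label_list_type_1 : List String) (out : List String × List String) : Decidable (Spec_write_hyp_dicts_to_file_type_1 hyp_dicts_type_1 ordered_label_list_type_1 out) := by unfold Spec_write_hyp_dicts_to_file_type_1; infer_instance

-- ===== CLAIM (what is proved, stated in full; the proofs are below) =====
def Claim_equal_write_hyp_dicts_to_file_type_1 : Prop := ∀ (hyp_dicts_type_1 : List (List (String × Int))) (ordered_label_list_type_1 : List String), Dom_write_hyp_dicts_to_file_type_1 hyp_dicts_type_1 ordered_label_list_type_1 → Pre_write_hyp_dicts_to_file_type_1 hyp_dicts_type_1 ordered_label_list_type_1 → Spec_write_hyp_dicts_to_file_type_1 hyp_dicts_type_1 ordered_label_list_type_1 (write_hyp_dicts_to_file_type_1 hyp_dicts_type_1 ordered_label_list_type_1)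

-- ===== LEMMAS AND PROOFS =====

-- stringified values that A collects for a fixed label, dict by dict
def pvValsA (hyp_dicts_type_1 : List (List (String × Int))) (label : String) : List String :=
  hyp_dicts_type_1.flatMap (fun d =>
    match List.lookup label d with
    | some v => [PySem.Int.toStr v]
    | none => [])

theorem pv_getD_fold_inner (d : List (String × Int)) (idx : PySem.Dict String (List String)) (k : String) :
    (d.foldl (fun idx p => idx.modify p.1 [] (fun l => l ++ [PySem.Int.toStr p.2])) idx).getD k []
    = idx.getD k [] ++ (d.filter (fun p => p.1 == k)).map (fun p => PySem.Int.toStr p.2) := by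
  induction d generalizing idx with
  | nil => simp
  | cons p rest ih =>
    simp only [List.foldl_cons, List.filter_cons]
    rw [ih, PySem.Dict.getD_modify]
    by_cases h : k = p.1
    · subst h; simp
    · rw [if_neg h]
      have hb : (p.1 == k) = false := by
        simp only [beq_eq_false_iff_ne, ne_eq]
        exact fun hk => h hk.symm
      simp [hb]

theorem pv_getD_fold_outer (hyp_dicts_type_1 : List (List (String × Int))) (k : String) :
    ∀ (idx : PySem.Dict String (List String)),
      PySem.Dict.getD (List.foldl (fun idx hyp_dict =>
        List.foldl (fun idx p => PySem.Dict.modify idx p.1 [] (fun l => l ++ [PySem.Int.toStr p.2])) idx hyp_dict) idx hyp_dicts_type_1) k []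
      = PySem.Dict.getD idx k [] ++ hyp_dicts_type_1.flatMap (fun d => (d.filter (fun p => p.1 == k)).map (fun p => PySem.Int.toStr p.2)) := by
  induction hyp_dicts_type_1 with
  | nil => simp
  | cons d rest ih =>
    intro idx
    simp only [List.foldl_cons, List.flatMap_cons]
    rw [ih, pv_getD_fold_inner, List.append_assoc]

theorem pv_getD_index (hyp_dicts_type_1 : List (List (String × Int))) (k : String) :
    (pvIndex_write_hyp hyp_dicts_type_1).getD k []
    = hyp_dicts_type_1.flatMap (fun d => (d.filter (fun p => p.1 == k)).map (fun p => PySem.Int.toStr p.2)) := by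
  simpa using pv_getD_fold_outer hyp_dicts_type_1 k PySem.Dict.empty

theorem pv_filter_eq_lookup (d : List (String × Int)) (k : String) (hnd : (d.map Prod.fst).Nodup) :
    (d.filter (fun p => p.1 == k)).map (fun p => PySem.Int.toStr p.2)
    = match List.lookup k d with
      | some v => [PySem.Int.toStr v]
      | none => [] := by
  induction d with
  | nil => simp [List.lookup]
  | cons p rest ih =>
    simp only [List.map_cons, List.nodup_cons] at hnd
    simp only [List.filter_cons, List.lookup]
    by_cases h : p.1 = k
    · have hrest : (rest.filter (fun p => p.1 == k)) = [] := by
        apply List.filter_eq_nil_iff.mpr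
        intro q hq hb
        exact hnd.1 (by
          have : q.1 = k := by simpa using hb
          rw [h, ← this]; exact List.mem_map_of_mem hq)
      simp [h, hrest]
    · have hb : (k == p.1) = false := by
        simp only [beq_eq_false_iff_ne, ne_eq]
        exact fun hk => h hk.symm
      simp [h, hb, ih hnd.2]

theorem pv_valsA_eq_index (hyp_dicts_type_1 : List (List (String × Int))) (label : String)
    (hpre : ∀ d ∈ hyp_dicts_type_1, (d.map Prod.fst).Nodup) :
    (pvIndex_write_hyp hyp_dicts_type_1).getD label [] = pvValsA hyp_dicts_type_1 label := by
  rw [pv_getD_index, pvValsA]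
  apply List.flatMap_congr
  intro d hd
  exact pv_filter_eq_lookup d label (hpre d hd)

theorem pv_emit_fold (label : String) (l : List String) (acc : List String × List String) :
    l.foldl (fun acc value_str => (acc.1 ++ [label], acc.2 ++ [value_str])) acc
    = (acc.1 ++ l.map (fun _ => label), acc.2 ++ l) := by
  induction l generalizing acc with
  | nil => simp
  | cons s rest ih => simp [ih, List.append_assoc]

theorem pv_A_inner (hyp_dicts_type_1 : List (List (String × Int))) (label : String) (acc : List String × List String) :
    hyp_dicts_type_1.foldl (fun acc hyp_dict =>
      match List.lookup label hyp_dict with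
      | some value => (acc.1 ++ [label], acc.2 ++ [PySem.Int.toStr value])
      | none => acc) acc
    = (acc.1 ++ (pvValsA hyp_dicts_type_1 label).map (fun _ => label), acc.2 ++ pvValsA hyp_dicts_type_1 label) := by
  induction hyp_dicts_type_1 generalizing acc with
  | nil => simp [pvValsA]
  | cons d rest ih =>
    simp only [List.foldl_cons, pvValsA, List.flatMap_cons]
    cases h : List.lookup label d with
    | none => simpa [pvValsA] using ih acc
    | some v =>
      
      rw [ih]
      simp [pvValsA, List.append_assoc]

theorem pv_outer (h : List (List (String × Int))) (o : List String)
    (hpre : ∀ d ∈ h, (d.map Prod.fst).Nodup) :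
    ∀ (acc : List String × List String),
      o.foldl (fun acc label =>
        h.foldl (fun acc hyp_dict =>
          match List.lookup label hyp_dict with
          | some value => (acc.1 ++ [label], acc.2 ++ [PySem.Int.toStr value])
          | none => acc) acc) acc
      = o.foldl (fun acc label =>
        ((pvIndex_write_hyp h).getD label []).foldl (fun acc value_str =>
          (acc.1 ++ [label], acc.2 ++ [value_str])) acc) acc := by
  induction o with
  | nil => intro acc; rfl
  | cons label rest ih =>
    intro acc
    simp only [List.foldl_cons]
    rw [pv_A_inner, pv_emit_fold, pv_valsA_eq_index h label hpre]
    exact ih _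

-- ===== VERDICT (by name: the statement is the Claim_ definition above) =====
theorem write_hyp_dicts_to_file_type_1_spec : Claim_equal_write_hyp_dicts_to_file_type_1 := by
  intro h o _ hpre
  unfold Spec_write_hyp_dicts_to_file_type_1 write_hyp_dicts_to_file_type_1 write_hyp_dicts_to_file_type_1_alt
  exact pv_outer h o hpre ([], [])
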